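-- pv_equiv track=rewrite | github.com/Naomi502/Myrepo | 蓝桥杯比赛试题/第十四届Python大学C组试题/试题E 填充.py | max_non_overlapping_substrings
-- ===== SOURCE A (Python) =====
-- def max_non_overlapping_substrings(s):
--     n = len(s)  # 字符串的长度
--     start, end = 0, -1  # 初始化起始位置和结束位置
--     intervals = []  # 存储所有可能的 01 子串区间
--
--     # 寻找所有可能的 01 子串区间
--     for i in range(n):
--         if s[i] == '0':  # 如果当前字符为 '0'，则更新结束位置
--             end = i
--         elif i + 1 < n and s[i + 1] == '1':  # 如果当前字符为 '1'，并且下一个字符也是 '1'，则表示有一个 01 子串区间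
--             start = i + 1  # 更新起始位置
--             intervals.append((start, end))  # 将子串区间添加到 intervals 列表中
--
--     # 根据区间结束位置贪心地选择最多的非重叠区间
--     result = []  # 存储最终结果
--     last_end = -1
--     for interval in sorted(intervals, key=lambda x: x[1]):
--         if interval[0] > last_end:  # 如果当前区间的起始位置大于上一个区间的结束位置，则两个区间不重叠
--             result.append(interval)  # 将当前区间添加到结果中
--             last_end = interval[1]  # 更新 last_end 变量为当前区间的结束位置
--
--     return len(result)  # 返回结果的长度
-- ===== SOURCE B (Python) =====
-- def max_non_overlapping_substrings(s):
--     # A's interval list comes out already sorted by end position and its greedy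
--     # filter accepts every interval, so the answer is a plain one-pass count of
--     # adjacent positions i with s[i] != '0' and s[i+1] == '1'.
--     return sum(1 for a, b in zip(s, s[1:]) if a != '0' and b == '1')
-- ===== Notes on version B (the rewrite author's own statement) =====
-- stated objective: simpler
-- what changed: B replaces A's interval-list construction, sort-by-end and greedy sweep by a single pairwise count: A's intervals are produced already sorted by end and the greedy condition always holds, so the result is just the number of adjacent positions i with s[i] != '0' and s[i+1] == '1'.
import Mathlib
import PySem

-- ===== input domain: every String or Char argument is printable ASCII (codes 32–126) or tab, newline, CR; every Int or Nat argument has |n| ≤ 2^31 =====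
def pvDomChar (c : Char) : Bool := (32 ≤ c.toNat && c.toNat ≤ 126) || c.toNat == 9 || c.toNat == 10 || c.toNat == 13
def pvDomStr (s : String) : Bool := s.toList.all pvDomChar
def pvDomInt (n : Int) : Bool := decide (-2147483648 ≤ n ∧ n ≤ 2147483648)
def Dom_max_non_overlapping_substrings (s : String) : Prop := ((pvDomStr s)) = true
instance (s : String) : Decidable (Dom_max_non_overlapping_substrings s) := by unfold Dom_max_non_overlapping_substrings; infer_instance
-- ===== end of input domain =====

-- B replaces A's build-intervals / sort-by-end / greedy-sweep pipeline by a single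
-- pairwise count (A's intervals are already sorted and its greedy always accepts).


-- ===== PORT A =====
-- one loop step of A's first 'for i in range(n)' loop; state = (start, end, intervals)
def pvStepA (cs : List Char) (n : Int) (st : Int × Int × List (Int × Int)) (i : Int) :
    Int × Int × List (Int × Int) :=
  if PySem.List.pyGetD cs i ' ' = '0' then (st.1, i, st.2.2)
  else if i + 1 < n ∧ PySem.List.pyGetD cs (i + 1) ' ' = '1' then
    (i + 1, st.2.1, st.2.2 ++ [(i + 1, st.2.1)])
  else st

-- one loop step of A's greedy loop; state = (result, last_end)
def pvStepG (acc : List (Int × Int) × Int) (p : Int × Int) : List (Int × Int) × Int :=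
  if p.1 > acc.2 then (acc.1 ++ [p], p.2) else acc

def max_non_overlapping_substrings (s : String) : Int :=
  let cs := s.toList
  let n : Int := PySem.List.len cs
  let st := (PySem.List.pyRange 0 n 1).foldl (pvStepA cs n) (0, -1, [])
  let intervals := st.2.2
  let fin := (PySem.List.sorted intervals (fun x => x.2) false).foldl pvStepG ([], -1)
  PySem.List.len fin.1

-- ===== PORT B =====
def max_non_overlapping_substrings_alt (s : String) : Int :=
  let cs := s.toList
  ((cs.zip (cs.drop 1)).countP (fun p => p.1 != '0' && p.2 == '1') : Nat)

-- ===== PRECONDITION & SPEC =====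
def Spec_max_non_overlapping_substrings (s : String) (out : Int) : Prop := out = max_non_overlapping_substrings_alt s
instance (s : String) (out : Int) : Decidable (Spec_max_non_overlapping_substrings s out) := by unfold Spec_max_non_overlapping_substrings; infer_instance

-- ===== CLAIM (what is proved, stated in full; the proofs are below) =====
def Claim_equal_max_non_overlapping_substrings : Prop := ∀ (s : String), Dom_max_non_overlapping_substrings s → Spec_max_non_overlapping_substrings s (max_non_overlapping_substrings s)

-- ===== LEMMAS AND PROOFS =====

-- the condition under which A appends an interval at index i (and B counts the pair)
def pvCond (cs : List Char) (i : Nat) : Bool :=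
  (cs[i]?.getD ' ' != '0') && decide (i + 1 < cs.length) && (cs[i + 1]?.getD ' ' == '1')

-- A's greedy loop keeps every interval when the list is sorted by end and each
-- interval's start exceeds its own end and the incoming last_end.
theorem pv_greedy_all (I : List (Int × Int)) (res : List (Int × Int)) (le : Int)
    (hp : I.Pairwise (fun a b => a.2 ≤ b.2))
    (h : ∀ p ∈ I, le ≤ p.2 ∧ p.2 < p.1) :
    (I.foldl pvStepG (res, le)).1 = res ++ I := by
  induction I generalizing res le with
  | nil => simp
  | cons p t ih =>
    have hph := h p (by simp)
    have hstep : pvStepG (res, le) p = (res ++ [p], p.2) := by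
      simp [pvStepG]; omega
    simp only [List.foldl_cons, hstep]
    rw [ih (res ++ [p]) p.2 (List.Pairwise.of_cons hp)]
    · simp
    · intro q hq
      exact ⟨(List.rel_of_pairwise_cons hp hq), (h q (by simp [hq])).2⟩

-- A's first loop after m steps (proof-side abbreviation)
def pvLoopA (cs : List Char) (m : Nat) : Int × Int × List (Int × Int) :=
  (List.range m).foldl (fun a (k : Nat) => pvStepA cs (cs.length : Int) a (k : Int))
    ((0 : Int), (-1 : Int), ([] : List (Int × Int)))

-- invariant of A's first loop after m steps
theorem pv_loopA_inv (cs : List Char) (m : Nat) (hm : m ≤ cs.length) :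
    -1 ≤ (pvLoopA cs m).2.1 ∧ (pvLoopA cs m).2.1 < (m : Int) ∧
    (pvLoopA cs m).2.2.Pairwise (fun a b => a.2 ≤ b.2) ∧
    (∀ p ∈ (pvLoopA cs m).2.2, -1 ≤ p.2 ∧ p.2 < p.1 ∧ p.2 ≤ (pvLoopA cs m).2.1) ∧
    (pvLoopA cs m).2.2.length = (List.range m).countP (pvCond cs) := by
  induction m with
  | zero => simp [pvLoopA]
  | succ m ih =>
    obtain ⟨h1, h2, h3, h4, h5⟩ := ih (by omega)
    have hstep : pvLoopA cs (m + 1) = pvStepA cs (cs.length : Int) (pvLoopA cs m) (m : Int) := by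
      simp [pvLoopA, List.range_succ]
    rw [hstep, List.range_succ, List.countP_append]
    simp only [List.countP_cons, List.countP_nil, Nat.zero_add]
    rcases hE : pvLoopA cs m with ⟨sa, se, sI⟩
    rw [hE] at h1 h2 h3 h4 h5
    dsimp only at h1 h2 h3 h4 h5 ⊢
    have hG1 : PySem.List.pyGetD cs ((m : Int) + 1) ' ' = cs[m + 1]?.getD ' ' := by
      have hcast : ((m : Int) + 1) = ((m + 1 : Nat) : Int) := by push_cast; ring
      rw [hcast, PySem.List.pyGetD_natCast]
      rfl
    by_cases hc0 : cs[m]?.getD ' ' = '0'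
    · have hA : pvStepA cs (cs.length : Int) (sa, se, sI) (m : Int) = (sa, (m : Int), sI) := by
        simp [pvStepA, hc0]
      rw [hA]
      dsimp only
      have hcond : pvCond cs m = false := by simp [pvCond, hc0]
      refine ⟨by omega, by omega, h3, ?_, by simp [hcond, h5]⟩
      intro p hp
      have := h4 p hp
      exact ⟨this.1, this.2.1, by omega⟩
    · by_cases hc1 : m + 1 < cs.length ∧ cs[m + 1]?.getD ' ' = '1'
      · have hA : pvStepA cs (cs.length : Int) (sa, se, sI) (m : Int)
            = ((m : Int) + 1, se, sI ++ [((m : Int) + 1, se)]) := by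
          have hlt : ((m : Int) + 1 < (cs.length : Int)) := by exact_mod_cast hc1.1
          simp [pvStepA, hc0, hlt, hG1, hc1.2]
        rw [hA]
        dsimp only
        have hcond : pvCond cs m = true := by
          have hv := hc1.2
          rw [List.getElem?_eq_getElem hc1.1] at hv
          simp [pvCond, hc0, hc1.1]
          simpa using hv
        refine ⟨h1, by push_cast; omega, ?_, ?_, by simp [hcond, h5]⟩
        · rw [List.pairwise_append]
          refine ⟨h3, by simp, ?_⟩
          intro a ha b hb
          simp at hb
          rw [hb]
          exact (h4 a ha).2.2
        · intro p hp
          rcases List.mem_append.mp hp with hp | hp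
          · have := h4 p hp
            exact ⟨this.1, this.2.1, this.2.2⟩
          · simp at hp
            rw [hp]
            exact ⟨h1, by omega, le_refl _⟩
      · have hA : pvStepA cs (cs.length : Int) (sa, se, sI) (m : Int) = (sa, se, sI) := by
          have hor : ¬ ((m : Int) + 1 < (cs.length : Int) ∧ PySem.List.pyGetD cs ((m : Int) + 1) ' ' = '1') := by
            intro ⟨ha, hb⟩
            refine hc1 ⟨by exact_mod_cast ha, ?_⟩
            rw [hG1] at hb
            exact hb
          simp [pvStepA, hc0, hor]
        rw [hA]
        dsimp only
        have hcond : pvCond cs m = false := by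
          simp only [pvCond, Bool.and_eq_false_iff]
          by_cases hlt : m + 1 < cs.length
          · right; simp; intro h; exact hc1 ⟨hlt, by simpa using h⟩
          · left; right; simpa using hlt
        exact ⟨h1, by omega, h3, h4, by simp [hcond, h5]⟩

-- B's zip runs over exactly the indexed adjacent pairs
theorem pv_zip_pairs (cs : List Char) :
    cs.zip (cs.drop 1)
      = (List.range (cs.length - 1)).map (fun i => (cs[i]?.getD ' ', cs[i + 1]?.getD ' ')) := by
  apply List.ext_getElem
  · simp [List.length_zip]
  · intro i h1 h2
    have hlen : i < cs.length - 1 := by simpa using h2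
    simp [List.getElem_zip, List.getElem?_eq_getElem (by omega : i < cs.length),
      List.getElem?_eq_getElem (by omega : i + 1 < cs.length)]

-- the last index never counts for A's condition, so range n and range (n-1) agree
theorem pv_count_eq (cs : List Char) :
    (List.range cs.length).countP (pvCond cs)
      = (List.range (cs.length - 1)).countP (pvCond cs) := by
  cases h : cs.length with
  | zero => simp
  | succ k =>
    rw [List.range_succ, List.countP_append]
    have hcond : pvCond cs k = false := by
      simp only [pvCond, Bool.and_eq_false_iff]
      left; right; simp [h]
    simp [hcond]

-- ===== VERDICT (by name: the statement is the Claim_ definition above) =====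
theorem max_non_overlapping_substrings_spec : Claim_equal_max_non_overlapping_substrings := by
  intro s _
  unfold Spec_max_non_overlapping_substrings max_non_overlapping_substrings max_non_overlapping_substrings_alt
  set cs := s.toList with hcs
  simp only [PySem.List.len_eq]
  rw [PySem.List.pyRange_zero_natCast, List.foldl_map]
  have hfold : List.foldl
      (fun (x : Int × Int × List (Int × Int)) (y : Nat) => pvStepA cs (cs.length : Int) x (y : Int))
      (0, -1, []) (List.range cs.length) = pvLoopA cs cs.length := by unfold pvLoopA; rfl
  rw [hfold]
  obtain ⟨h1, h2, h3, h4, h5⟩ := pv_loopA_inv cs cs.length (le_refl _)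
  rw [PySem.List.sorted_eq_self_of_pairwise (pvLoopA cs cs.length).2.2 (fun x => x.2) h3]
  rw [pv_greedy_all (pvLoopA cs cs.length).2.2 [] (-1) h3
    (fun p hp => ⟨by have := (h4 p hp).1; omega, (h4 p hp).2.1⟩)]
  simp only [List.nil_append, h5]
  rw [pv_zip_pairs cs, List.countP_map, pv_count_eq cs]
  congr 1
  apply List.countP_congr
  intro i hi
  simp only [List.mem_range] at hi
  have hlt : i + 1 < cs.length := by omega
  simp [pvCond, Function.comp, hlt]
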